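-- pv_equiv track=rewrite | github.com/Tal-Even-Zahav/Python_HW2 | ex_ 2 209190321.py | dict_longest_repetition
-- ===== SOURCE A (Python) =====
-- def dict_longest_repetition(s):
--     dict = {}
--     for c in s:
--      #if c not in s:
--      #       return 0
--         counter = 1
--         max_counter = 0
--         prev = ''
--         for curr in s:
--             if curr.lower() == c.lower():
--                 if curr.lower() == prev.lower():
--                     counter = counter + 1
--                 else:
--                     counter = 1
--             if counter > max_counter:
--                 max_counter = counter
--             prev = curr
--             dict[c.lower()] = (max_counter)
--     return dict
-- ===== SOURCE B (Python) =====
-- def dict_longest_repetition(s):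
--     best = {}
--     run = 0
--     prev = None
--     for ch in s:
--         c = ch.lower()
--         run = run + 1 if c == prev else 1
--         if best.get(c, 0) < run:
--             best[c] = run
--         prev = c
--     return best
-- ===== Notes on version B (the rewrite author's own statement) =====
-- stated objective: faster
-- what changed: Replaced A's per-character full rescan of s (nested loops) by a single left-to-right pass that tracks the current case-insensitive run length and keeps a per-character running maximum in the dict.
import Mathlib
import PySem

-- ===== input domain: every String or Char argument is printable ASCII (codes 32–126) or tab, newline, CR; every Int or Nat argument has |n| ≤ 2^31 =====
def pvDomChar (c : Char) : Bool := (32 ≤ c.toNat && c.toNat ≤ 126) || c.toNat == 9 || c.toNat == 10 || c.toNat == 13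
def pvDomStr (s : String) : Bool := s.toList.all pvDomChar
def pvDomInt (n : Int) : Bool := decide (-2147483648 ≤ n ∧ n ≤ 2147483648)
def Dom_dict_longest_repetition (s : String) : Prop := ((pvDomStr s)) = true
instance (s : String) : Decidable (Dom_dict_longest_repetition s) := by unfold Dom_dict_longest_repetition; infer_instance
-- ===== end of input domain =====

-- B replaces A's per-character full rescan of s by one linear pass keeping the current
-- case-insensitive run length and a per-character maximum (objective: faster, O(n^2) → O(n)).

-- ===== PORT A =====
-- c.lower() for a one-character string c
def pvLow (c : Char) : String := PySem.Str.lower (String.singleton c)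

-- body of A's inner 'for curr in s' loop; state = (counter, max_counter, prev, dict)
def pvInnerStep (k : String) (st : Int × Int × String × PySem.Dict String Int) (curr : Char) :
    Int × Int × String × PySem.Dict String Int :=
  let (counter, max_counter, prev, d) := st
  let counter := if pvLow curr = k then (if pvLow curr = PySem.Str.lower prev then counter + 1 else 1) else counter
  let max_counter := if counter > max_counter then counter else max_counter
  (counter, max_counter, String.singleton curr, d.insert k max_counter)

def dict_longest_repetition (s : String) : List (String × Int) :=
  let d := s.toList.foldl
    (fun d c => (s.toList.foldl (pvInnerStep (pvLow c)) (1, 0, "", d)).2.2.2)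
    PySem.Dict.empty
  d.items

-- ===== PORT B =====
def dict_longest_repetition_alt (s : String) : List (String × Int) :=
  let st := s.toList.foldl
    (fun (st : PySem.Dict String Int × Int × Option String) ch =>
      let (best, run, prev) := st
      let c := PySem.Str.lower (String.singleton ch)
      let run := if some c = prev then run + 1 else 1
      let best := if best.getD c 0 < run then best.insert c run else best
      (best, run, some c))
    (PySem.Dict.empty, 0, none)
  st.1.items

-- ===== PRECONDITION & SPEC =====
def Spec_dict_longest_repetition (s : String) (out : List (String × Int)) : Prop := out = dict_longest_repetition_alt s
instance (s : String) (out : List (String × Int)) : Decidable (Spec_dict_longest_repetition s out) := by unfold Spec_dict_longest_repetition; infer_instance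

-- ===== CLAIM (what is proved, stated in full; the proofs are below) =====
def Claim_equal_dict_longest_repetition : Prop := ∀ (s : String), Dom_dict_longest_repetition s → Spec_dict_longest_repetition s (dict_longest_repetition s)

-- ===== LEMMAS AND PROOFS =====

-- spec-level step of A's inner loop over the already-lowercased list
def pvF3 (k : String) (st : Int × Int × String) (x : String) : Int × Int × String :=
  let (cnt, mx, prev) := st
  let cnt := if x = k then (if x = prev then cnt + 1 else 1) else cnt
  let mx := if cnt > mx then cnt else mx
  (cnt, mx, x)

def pvAfold (p : List String) (k : String) : Int × Int × String := p.foldl (pvF3 k) (1, 0, "")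
def pvAmx (p : List String) (k : String) : Int := (pvAfold p k).2.1

def pvBstep (st : PySem.Dict String Int × Int × Option String) (c : String) :
    PySem.Dict String Int × Int × Option String :=
  let (best, run, prev) := st
  let run := if some c = prev then run + 1 else 1
  let best := if best.getD c 0 < run then best.insert c run else best
  (best, run, some c)

def pvBfold (p : List String) : PySem.Dict String Int × Int × Option String :=
  p.foldl pvBstep (PySem.Dict.empty, 0, none)

lemma pvLow_toList (c : Char) : (pvLow c).toList = [PySem.Chars.lowerChar c] := by
  simp [pvLow, PySem.Str.lower, PySem.Chars.lower]

lemma pvLow_ne_empty (c : Char) : pvLow c ≠ "" := by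
  intro h
  have := congrArg String.toList h
  rw [pvLow_toList] at this
  simp at this

lemma pvInsert_insert_self (d : PySem.Dict String Int) (k : String) (v w : Int) :
    (d.insert k v).insert k w = d.insert k w := by
  apply PySem.Dict.ext
  rw [PySem.Dict.items_insert_of_contains _ w (PySem.Dict.contains_insert_self d k v)]
  by_cases h : d.contains k
  · rw [PySem.Dict.items_insert_of_contains _ v h, PySem.Dict.items_insert_of_contains _ w h, List.map_map]
    apply List.map_congr_left; intro p _
    by_cases hp : p.1 = k <;> simp [hp]
  · rw [PySem.Dict.items_insert_of_not_contains _ v (by simpa using h),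
        PySem.Dict.items_insert_of_not_contains _ w (by simpa using h)]
    simp only [List.map_append, List.map_cons, List.map_nil]
    congr 1
    · conv_rhs => rw [← List.map_id d.items]
      apply List.map_congr_left; intro p hp
      simp only [PySem.Dict.contains, List.any_eq_true] at h
      have hk : ¬ p.1 = k := fun hk => h ⟨p, hp, by simp [hk]⟩
      simp [hk]
    · simp

-- bridge: A's raw inner loop vs the lowered spec fold
lemma pvInner_bridge (k : String) : ∀ (l : List Char) (cnt mx : Int) (prevS : String) (d : PySem.Dict String Int),
    (l.foldl (pvInnerStep k) (cnt, mx, prevS, d)).1 = ((l.map pvLow).foldl (pvF3 k) (cnt, mx, PySem.Str.lower prevS)).1 ∧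
    (l.foldl (pvInnerStep k) (cnt, mx, prevS, d)).2.1 = ((l.map pvLow).foldl (pvF3 k) (cnt, mx, PySem.Str.lower prevS)).2.1 ∧
    (l.foldl (pvInnerStep k) (cnt, mx, prevS, d)).2.2.2 =
      (if l = [] then d else d.insert k ((l.map pvLow).foldl (pvF3 k) (cnt, mx, PySem.Str.lower prevS)).2.1) := by
  intro l
  induction l with
  | nil => intro cnt mx prevS d; simp
  | cons c l ih =>
    intro cnt mx prevS d
    simp only [List.foldl_cons, List.map_cons]
    simp only [pvInnerStep, pvF3]
    set cnt1 := if pvLow c = k then (if pvLow c = PySem.Str.lower prevS then cnt + 1 else 1) else cnt with hc1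
    set mx1 := if cnt1 > mx then cnt1 else mx with hm1
    have hlow : PySem.Str.lower (String.singleton c) = pvLow c := rfl
    obtain ⟨h1, h2, h3⟩ := ih cnt1 mx1 (String.singleton c) (d.insert k mx1)
    rw [hlow] at h1 h2 h3
    refine ⟨h1, h2, ?_⟩
    rw [h3]
    by_cases hl : l = []
    · simp [hl]
    · simp only [if_neg hl, if_neg (by simp : ¬ (c :: l = []))]
      rw [pvInsert_insert_self]

lemma pvAfold_prev (k : String) : ∀ (p : List String) (cnt mx : Int) (pr : String),
    (p.foldl (pvF3 k) (cnt, mx, pr)).2.2 = p.getLast?.getD pr := by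
  intro p
  induction p with
  | nil => intro cnt mx pr; simp
  | cons x p ih =>
    intro cnt mx pr
    simp only [List.foldl_cons, pvF3]
    rw [ih]
    cases p with
    | nil => simp
    | cons y q =>
      rw [List.getLast?_cons_cons]
      cases hh : (y :: q).getLast? with
      | none => simp at hh
      | some z => simp

lemma pvAfold_pres (k : String) : ∀ (p : List String) (st : Int × Int × String),
    1 ≤ st.1 → st.1 ≤ st.2.1 →
    (p.foldl (pvF3 k) st).1 ≤ (p.foldl (pvF3 k) st).2.1 ∧ 1 ≤ (p.foldl (pvF3 k) st).1 ∧
      st.2.1 ≤ (p.foldl (pvF3 k) st).2.1 := by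
  intro p
  induction p with
  | nil => intro st h1 h2; exact ⟨h2, h1, le_refl _⟩
  | cons x p ih =>
    intro st h1 h2
    obtain ⟨cnt, mx, pr⟩ := st
    simp only [List.foldl_cons, pvF3]
    set cnt1 := if x = k then (if x = pr then cnt + 1 else 1) else cnt with hc1
    set mx1 := if cnt1 > mx then cnt1 else mx with hm1
    have hcnt1 : 1 ≤ cnt1 := by simp only [hc1]; split_ifs <;> simp_all <;> omega
    have hle : cnt1 ≤ mx1 := by simp only [hm1]; split_ifs <;> omega
    have hmono : mx ≤ mx1 := by simp only [hm1]; split_ifs <;> omega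
    obtain ⟨a, b, c⟩ := ih (cnt1, mx1, x) hcnt1 hle
    exact ⟨a, b, le_trans hmono c⟩

lemma pvAfold_cnt_le_mx (k : String) (p : List String) (hp : p ≠ []) :
    (pvAfold p k).1 ≤ (pvAfold p k).2.1 ∧ 1 ≤ (pvAfold p k).2.1 := by
  obtain ⟨x, p, rfl⟩ : ∃ x l, p = x :: l := by
    cases p with
    | nil => exact absurd rfl hp
    | cons a l => exact ⟨a, l, rfl⟩
  unfold pvAfold
  simp only [List.foldl_cons, pvF3]
  set cnt1 := if x = k then (if x = "" then (1:Int) + 1 else 1) else 1 with hc1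
  set mx1 := if cnt1 > 0 then cnt1 else 0 with hm1
  have hcnt1 : 1 ≤ cnt1 := by simp only [hc1]; split_ifs <;> omega
  have hle : cnt1 ≤ mx1 := by simp only [hm1]; split_ifs <;> omega
  obtain ⟨a, b, c⟩ := pvAfold_pres k p (cnt1, mx1, x) hcnt1 hle
  exact ⟨a, le_trans (le_trans hcnt1 hle) c⟩

lemma pvAfold_notmem (k : String) : ∀ (p : List String), k ∉ p → ∀ (m : Int) (pr : String), m = 0 ∨ m = 1 →
    (p.foldl (pvF3 k) (1, m, pr)).1 = 1 ∧ (p.foldl (pvF3 k) (1, m, pr)).2.1 = (if p = [] then m else 1) := by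
  intro p
  induction p with
  | nil => intro _ m pr _; simp
  | cons x p ih =>
    intro hk m pr hm
    have hxk : ¬ x = k := fun h => hk (by simp [h])
    have hkp : k ∉ p := fun h => hk (by simp [h])
    simp only [List.foldl_cons, pvF3, if_neg hxk]
    have hm1 : (if (1:Int) > m then (1:Int) else m) = 1 := by rcases hm with rfl | rfl <;> norm_num
    rw [hm1]
    obtain ⟨a, b⟩ := ih hkp 1 x (Or.inr rfl)
    refine ⟨a, ?_⟩
    rw [b]
    by_cases hp : p = [] <;> simp [hp]

lemma pvDedup_append (p : List String) (x : String) :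
    PySem.List.dedup (p ++ [x]) = if x ∈ p then PySem.List.dedup p else PySem.List.dedup p ++ [x] := by
  have : PySem.List.dedup (p ++ [x]) = PySem.Set.add (PySem.List.dedup p) x := by
    simp [PySem.List.dedup, PySem.Set.ofList, List.foldl_append]
  rw [this, PySem.Set.add]
  by_cases hx : x ∈ p
  · rw [if_pos (by simpa using (PySem.List.mem_dedup p x).mpr hx), if_pos hx]
  · rw [if_neg (fun h => hx ((PySem.List.mem_dedup p x).mp (by simpa using h))), if_neg hx]

lemma pvB_invariant : ∀ (p : List String), (∀ x ∈ p, x ≠ "") →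
    (pvBfold p).2.2 = p.getLast? ∧
    (∀ z, p.getLast? = some z → (pvBfold p).2.1 = (pvAfold p z).1) ∧
    (∀ k, (pvBfold p).1.getD k 0 = if k ∈ p then pvAmx p k else 0) ∧
    (pvBfold p).1.keys = PySem.List.dedup p ∧
    (pvBfold p).1.keys.Nodup := by
  intro p
  induction p using List.reverseRecOn with
  | nil =>
    intro _
    refine ⟨rfl, by simp, fun k => by simp [pvBfold, PySem.Dict.getD_empty], by simp [pvBfold, PySem.List.dedup, PySem.Set.ofList], by simp [pvBfold]⟩
  | append_singleton p x ih =>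
    intro hne
    have hx : x ≠ "" := hne x (by simp)
    obtain ⟨ih1, ih2, ih3, ih4, ih5⟩ := ih (fun y hy => hne y (by simp [hy]))
    have hBstep : pvBfold (p ++ [x]) = pvBstep (pvBfold p) x := by
      simp [pvBfold, List.foldl_append]
    have hAstep : ∀ k, pvAfold (p ++ [x]) k = pvF3 k (pvAfold p k) x := by
      intro k; simp [pvAfold, List.foldl_append]
    have hprevA : ∀ k, (pvAfold p k).2.2 = p.getLast?.getD "" := fun k => pvAfold_prev k p 1 0 ""
    have hrun : (pvBfold (p ++ [x])).2.1 = (pvAfold (p ++ [x]) x).1 := by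
      rw [hBstep, hAstep x]
      by_cases hp : p.getLast? = some x
      · have hprev : (pvAfold p x).2.2 = x := by rw [hprevA, hp]; rfl
        simp [pvBstep, pvF3, ih1, hp, hprev, ih2 x hp]
      · have hprev : ¬ x = (pvAfold p x).2.2 := by
          rw [hprevA]
          cases hpl : p.getLast? with
          | none => exact fun h => hx h
          | some z => exact fun h => hp (by rw [hpl, h]; rfl)
        simp [pvBstep, pvF3, ih1, hprev]
        intro h
        exact absurd h.symm hp
    have hkeys : (pvBfold (p ++ [x])).1.keys = PySem.List.dedup (p ++ [x]) := by
      rw [hBstep]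
      simp only [pvBstep]
      by_cases hxp : x ∈ p
      · have hcont : (pvBfold p).1.contains x = true := by
          rw [PySem.Dict.contains_iff_mem_keys, ih4]
          exact (PySem.List.mem_dedup p x).mpr hxp
        rw [pvDedup_append, if_pos hxp]
        by_cases hins : (pvBfold p).1.getD x 0 < (if some x = (pvBfold p).2.2 then (pvBfold p).2.1 + 1 else 1)
        · rw [if_pos hins, PySem.Dict.keys_insert_of_contains _ _ hcont, ih4]
        · rw [if_neg hins, ih4]
      · have hcont : (pvBfold p).1.contains x = false := by
          rw [Bool.eq_false_iff]
          intro h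
          rw [PySem.Dict.contains_iff_mem_keys, ih4] at h
          exact hxp ((PySem.List.mem_dedup p x).mp h)
        have hrun1 : (if some x = (pvBfold p).2.2 then (pvBfold p).2.1 + 1 else 1) = 1 := by
          rw [if_neg]
          intro h
          rw [ih1] at h
          exact hxp (List.mem_of_getLast? h.symm)
        have hbv : (pvBfold p).1.getD x 0 = 0 := by rw [ih3 x, if_neg hxp]
        rw [hrun1, hbv, if_pos (by omega), PySem.Dict.keys_insert_of_not_contains _ _ hcont,
            ih4, pvDedup_append, if_neg hxp]
    refine ⟨by rw [hBstep]; simp [pvBstep], ?_, ?_, hkeys, by rw [hkeys]; exact PySem.List.nodup_dedup _⟩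
    · intro z hz
      rw [List.getLast?_concat] at hz
      cases hz
      exact hrun
    · -- getD clause
      intro k
      have hAx : pvAmx (p ++ [x]) k = (pvF3 k (pvAfold p k) x).2.1 := by
        unfold pvAmx; rw [hAstep k]
      rw [hBstep, hAx]
      by_cases hkx : k = x
      · subst hkx
        by_cases hp : p.getLast? = some k
        · have hkp : k ∈ p := List.mem_of_getLast? hp
          have hpne : p ≠ [] := List.ne_nil_of_mem hkp
          have hprev : (pvAfold p k).2.2 = k := by rw [hprevA, hp]; rfl
          obtain ⟨hc, hm1⟩ := pvAfold_cnt_le_mx k p hpne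
          have hrunv : (pvBfold p).2.1 = (pvAfold p k).1 := ih2 k hp
          have hbv : (pvBfold p).1.getD k 0 = (pvAfold p k).2.1 := by
            rw [ih3 k, if_pos hkp]; rfl
          simp only [pvBstep, pvF3, ih1, hp, hprev, hrunv, hbv,
            apply_ite (fun d : PySem.Dict String Int => d.getD k 0),
            PySem.Dict.getD_insert, List.mem_append, List.mem_singleton]
          simp [hkp]
        · have hprev : ¬ k = (pvAfold p k).2.2 := by
            rw [hprevA]
            cases hpl : p.getLast? with
            | none => exact fun h => hx h
            | some z => exact fun h => hp (by rw [hpl, h]; rfl)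
          have hlast : ¬ (some k = (pvBfold p).2.2) := by
            rw [ih1]; exact fun h => hp h.symm
          by_cases hkp : k ∈ p
          · have hpne : p ≠ [] := List.ne_nil_of_mem hkp
            obtain ⟨hc, hm1⟩ := pvAfold_cnt_le_mx k p hpne
            have hbv : (pvBfold p).1.getD k 0 = (pvAfold p k).2.1 := by
              rw [ih3 k, if_pos hkp]; rfl
            simp only [pvBstep, pvF3, if_neg hlast, if_neg hprev, hbv,
              apply_ite (fun d : PySem.Dict String Int => d.getD k 0),
              PySem.Dict.getD_insert, List.mem_append, List.mem_singleton]
            simp [hkp]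
          · have hbv : (pvBfold p).1.getD k 0 = 0 := by rw [ih3 k, if_neg hkp]
            obtain ⟨ha, hb⟩ := pvAfold_notmem k p hkp 0 "" (Or.inl rfl)
            have hcnt1 : (pvAfold p k).1 = 1 := ha
            have hmx01 : 0 ≤ (pvAfold p k).2.1 ∧ (pvAfold p k).2.1 ≤ 1 := by
              rw [show (pvAfold p k).2.1 = (List.foldl (pvF3 k) (1, 0, "") p).2.1 from rfl, hb]
              split_ifs <;> omega
            simp only [pvBstep, pvF3, if_neg hlast, if_neg hprev, hbv, hcnt1,
              apply_ite (fun d : PySem.Dict String Int => d.getD k 0),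
              PySem.Dict.getD_insert, List.mem_append, List.mem_singleton]
            simp
            intro h
            show (1:Int) = (pvAfold p k).2.1
            have h2 : (1:Int) ≤ (pvAfold p k).2.1 := h
            omega
      · -- k ≠ x
        have hB' : (pvBstep (pvBfold p) x).1.getD k 0 = (pvBfold p).1.getD k 0 := by
          simp only [pvBstep]
          by_cases hins : (pvBfold p).1.getD x 0 < (if some x = (pvBfold p).2.2 then (pvBfold p).2.1 + 1 else 1)
          · rw [if_pos hins, PySem.Dict.getD_insert, if_neg hkx]
          · rw [if_neg hins]
        rw [hB', ih3 k]
        by_cases hkp : k ∈ p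
        · have hpne : p ≠ [] := List.ne_nil_of_mem hkp
          obtain ⟨hc, hm1⟩ := pvAfold_cnt_le_mx k p hpne
          simp only [pvF3, if_neg (fun h => hkx (Eq.symm h))]
          simp [hkp, show pvAmx p k = (pvAfold p k).2.1 from rfl]
          intro h
          have h2 : (pvAfold p k).2.1 < (pvAfold p k).1 := h
          omega
        · simp only [pvF3, if_neg (fun h => hkx (Eq.symm h))]
          simp [hkp, hkx]
lemma pvGetD_foldl_insert_val (v : String → Int) : ∀ (l : List String) (d : PySem.Dict String Int) (k : String),
    (l.foldl (fun d x => d.insert x (v x)) d).getD k 0 = if k ∈ l then v k else d.getD k 0 := by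
  intro l
  induction l with
  | nil => intro d k; simp
  | cons x l ih =>
    intro d k
    simp only [List.foldl_cons]
    rw [ih]
    by_cases hl : k ∈ l
    · simp [hl]
    · rw [if_neg hl, PySem.Dict.getD_insert]
      by_cases hx : k = x
      · simp [hx]
      · simp [hx, hl]

lemma pvItems_eq_keys_map (d : PySem.Dict String Int) (h : d.keys.Nodup) :
    d.items = d.keys.map (fun k => (k, d.getD k 0)) := by
  simp only [PySem.Dict.keys, List.map_map]
  conv_lhs => rw [← List.map_id d.items]
  apply List.map_congr_left
  intro p hp
  have : d.getD p.1 0 = p.2 :=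
    PySem.Dict.getD_of_mem_items d (by simpa using hp) h 0
  simp [Function.comp, this]

lemma pvA_char (s : String) :
    dict_longest_repetition s =
      ((s.toList.map pvLow).foldl
        (fun d k => d.insert k (pvAmx (s.toList.map pvLow) k)) PySem.Dict.empty).items := by
  unfold dict_longest_repetition
  show (s.toList.foldl
      (fun d c => (s.toList.foldl (pvInnerStep (pvLow c)) (1, 0, "", d)).2.2.2)
      PySem.Dict.empty).items = _
  congr 1
  rw [List.foldl_map]
  apply PySem.List.foldl_congr_mem
  intro d c hc
  have hcs : s.toList ≠ [] := by intro h; rw [h] at hc; simp at hc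
  obtain ⟨-, -, h3⟩ := pvInner_bridge (pvLow c) s.toList 1 0 "" d
  rw [h3, if_neg hcs]
  rfl

lemma pvKeys_foldl_insert_val (v : String → Int) (l : List String) :
    ((l.foldl (fun d x => d.insert x (v x)) PySem.Dict.empty).keys = PySem.List.dedup l) ∧
    (l.foldl (fun d x => d.insert x (v x)) PySem.Dict.empty).keys.Nodup := by
  constructor
  · rw [PySem.Dict.keys_foldl_insert l (fun _ x => v x) PySem.Dict.empty]
    simp [PySem.Set.update, PySem.List.dedup, PySem.Set.ofList, PySem.Dict.keys_empty]
  · exact PySem.Dict.nodup_keys_foldl_insert l (fun _ x => v x) PySem.Dict.empty (by simp [PySem.Dict.keys_empty])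

-- ===== VERDICT (by name: the statement is the Claim_ definition above) =====
theorem dict_longest_repetition_spec : Claim_equal_dict_longest_repetition := by
  intro s _
  unfold Spec_dict_longest_repetition
  have hne : ∀ x ∈ s.toList.map pvLow, x ≠ "" := by
    intro x hx
    obtain ⟨c, -, rfl⟩ := List.mem_map.mp hx
    exact pvLow_ne_empty c
  obtain ⟨b1, b2, b3, b4, b5⟩ := pvB_invariant (s.toList.map pvLow) hne
  have hBalt : dict_longest_repetition_alt s = (pvBfold (s.toList.map pvLow)).1.items := by
    unfold dict_longest_repetition_alt pvBfold
    rw [List.foldl_map]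
    rfl
  rw [pvA_char s, hBalt]
  obtain ⟨k1, k2⟩ := pvKeys_foldl_insert_val (pvAmx (s.toList.map pvLow)) (s.toList.map pvLow)
  rw [pvItems_eq_keys_map _ k2, pvItems_eq_keys_map _ b5, k1, b4]
  apply List.map_congr_left
  intro k hk
  have hkL : k ∈ s.toList.map pvLow := (PySem.List.mem_dedup _ k).mp hk
  rw [pvGetD_foldl_insert_val (pvAmx (s.toList.map pvLow)) (s.toList.map pvLow) PySem.Dict.empty k,
      if_pos hkL, b3 k, if_pos hkL]
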